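-- pv_equiv track=rewrite | github.com/joejstuart/barren-land-analysis | barrenLand.py | barren_points
-- ===== SOURCE A (Python) =====
-- from itertools import product, izip
--
-- def pair(points):
--     p = iter(points)
--     return izip(p, p)
--
-- def barren_points(barren_edges):
--     """
--     Parses the barren points input into a list of tuples
--
--     Args:
--         param1: (string) A string containing the
--         bottom left and top right coordinates
--
--     Returns:
--         (list)
--     """
--     barren_collection = []
--
--     for barren in barren_edges:
--         points = []
--         for x, y in pair(barren.split()):
--             point = (int(x), int(y))
--
--             points.append(point)
--
--         barren_collection.append(points)
--
--     return barren_collection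
-- ===== SOURCE B (Python) =====
-- def _pairs(toks):
--     # group consecutive tokens into pairs via strided slices; zip drops a trailing odd token
--     return list(zip(toks[::2], toks[1::2]))
--
-- def barren_points(barren_edges):
--     return [[(int(x), int(y)) for x, y in _pairs(b.split())] for b in barren_edges]
-- ===== Notes on version B (the rewrite author's own statement) =====
-- stated objective: simpler
-- what changed: Replaces the nested append loops with the izip(p,p) iterator-consuming pairing by a nested list comprehension that forms pairs via zip of the two strided slices toks[::2] and toks[1::2].
import Mathlib
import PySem

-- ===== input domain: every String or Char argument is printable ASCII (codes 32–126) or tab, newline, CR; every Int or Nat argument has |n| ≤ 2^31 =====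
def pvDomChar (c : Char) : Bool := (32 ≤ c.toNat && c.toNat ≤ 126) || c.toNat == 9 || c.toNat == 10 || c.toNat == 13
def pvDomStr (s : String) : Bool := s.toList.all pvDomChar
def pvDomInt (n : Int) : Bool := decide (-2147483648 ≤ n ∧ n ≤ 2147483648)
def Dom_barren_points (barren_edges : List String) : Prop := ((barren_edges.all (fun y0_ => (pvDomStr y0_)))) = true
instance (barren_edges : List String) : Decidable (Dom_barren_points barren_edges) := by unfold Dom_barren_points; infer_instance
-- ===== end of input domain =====

-- B replaces A's nested append loops with izip(p,p) pairing by a comprehension pairing tokens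
-- via zip of the strided slices toks[::2] and toks[1::2] (objective: simpler).

-- ===== PORT A =====
-- pair(points) with izip(p,p): consume the token list two at a time, dropping a trailing odd token
def pairA : List String → List (String × String)
  | x :: y :: rest => (x, y) :: pairA rest
  | _ => []

def barren_points (barren_edges : List String) : List (List (Int × Int)) :=
  barren_edges.foldl
    (fun barren_collection barren =>
      barren_collection ++
        [(pairA (PySem.Str.split₀ barren)).foldl
          (fun points xy =>
            points ++ [((PySem.Int.ofStr? xy.1).getD 0, (PySem.Int.ofStr? xy.2).getD 0)])
          []])
    []

-- ===== PORT B =====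
-- _pairs(toks) = list(zip(toks[::2], toks[1::2]))
def pairsB (toks : List String) : List (String × String) :=
  List.zip ((PySem.List.slice? toks none none 2).getD [])
           ((PySem.List.slice? toks (some 1) none 2).getD [])

def barren_points_alt (barren_edges : List String) : List (List (Int × Int)) :=
  barren_edges.map (fun b =>
    (pairsB (PySem.Str.split₀ b)).map (fun xy =>
      ((PySem.Int.ofStr? xy.1).getD 0, (PySem.Int.ofStr? xy.2).getD 0)))

-- ===== PRECONDITION & SPEC =====
-- Pre_ excludes exactly the inputs where Python A raises ValueError: an edge string whose
-- paired tokens (all tokens except a trailing unpaired one) are not all parseable as int.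
def Pre_barren_points (barren_edges : List String) : Prop :=
  (barren_edges.all (fun b =>
    ((PySem.Str.split₀ b).take (2 * ((PySem.Str.split₀ b).length / 2))).all
      (fun t => (PySem.Int.ofStr? t).isSome))) = true
instance (barren_edges : List String) : Decidable (Pre_barren_points barren_edges) := by
  unfold Pre_barren_points; infer_instance

def pvWitness_barren_points : List String := ["0 599 0 9", "1 2"]

def Spec_barren_points (barren_edges : List String) (out : List (List (Int × Int))) : Prop := out = barren_points_alt barren_edges
instance (barren_edges : List String) (out : List (List (Int × Int))) : Decidable (Spec_barren_points barren_edges out) := by unfold Spec_barren_points; infer_instance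

-- ===== CLAIM (what is proved, stated in full; the proofs are below) =====
def Claim_equal_barren_points : Prop := ∀ (barren_edges : List String), Dom_barren_points barren_edges → Pre_barren_points barren_edges → Spec_barren_points barren_edges (barren_points barren_edges)

-- ===== LEMMAS AND PROOFS =====

-- elements at even (b = true) resp. odd (b = false) positions
def ev {α : Type} : Bool → List α → List α
  | _, [] => []
  | true, x :: xs => x :: ev false xs
  | false, _ :: xs => ev true xs

-- the filterMap form slice? produces for step 2, start 0
def F {α : Type} (xs : List α) : List α :=
  (List.range ((xs.length + 1) / 2)).filterMap (fun k => xs[2 * k]?)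

theorem F_eq_ev {α : Type} : ∀ xs : List α, F xs = ev true xs
  | [] => by simp [F, ev]
  | [x] => by simp [F, ev, List.range_succ]
  | x :: y :: r => by
    have h : (x :: y :: r).length + 1 = (r.length + 1) + 2 := by simp
    simp only [F, h]
    have h2 : ((r.length + 1) + 2) / 2 = (r.length + 1) / 2 + 1 := by omega
    rw [h2, List.range_succ_eq_map, List.filterMap_cons, List.filterMap_map]
    simp only [List.getElem?_cons_zero, Nat.mul_zero]
    have h3 : ∀ k : Nat, (x :: y :: r)[2 * (k + 1)]? = r[2 * k]? := by
      intro k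
      have : 2 * (k + 1) = 2 * k + 1 + 1 := by omega
      rw [this]; simp
    simp only [Function.comp, h3]
    have := F_eq_ev r
    simp only [F] at this
    rw [this]
    rfl

theorem slice?_step2 {α : Type} (xs : List α) :
    PySem.List.slice? xs none none 2 = some (F xs) := by
  simp only [PySem.List.slice?, PySem.List.sliceIndices, F]
  norm_num
  have hc : (if 0 < xs.length then (((xs.length : Int) + 2 - 1) / 2).toNat else 0)
      = (xs.length + 1) / 2 := by split <;> omega
  rw [hc]
  have hidx : ∀ k : Nat, ((2 : Int) * (k : Int)).toNat = 2 * k := fun k => by omega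
  simp only [hidx]

theorem slice?_step2_one {α : Type} : ∀ xs : List α,
    PySem.List.slice? xs (some 1) none 2 = some (F xs.tail)
  | [] => by simp [PySem.List.slice?, PySem.List.sliceIndices, F]
  | x :: r => by
    simp only [PySem.List.slice?, PySem.List.sliceIndices, F]
    norm_num
    have hc : (if 0 < r.length then (((r.length : Int) + 2 - 1) / 2).toNat else 0)
        = (r.length + 1) / 2 := by split <;> omega
    rw [hc]
    congr 1
    funext k
    have h1 : ((1 : Int) + 2 * (k : Int)).toNat = 2 * k + 1 := by omega
    rw [h1]
    simp [List.getElem?_cons_succ]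

theorem ev_false_eq_tail {α : Type} (xs : List α) : ev false xs = ev true xs.tail := by
  cases xs <;> rfl

theorem zip_ev_eq_pairA : ∀ xs : List String,
    List.zip (ev true xs) (ev false xs) = pairA xs
  | [] => rfl
  | [x] => rfl
  | x :: y :: r => by
    simp only [ev, pairA, List.zip_cons_cons]
    exact congrArg _ (zip_ev_eq_pairA r)

theorem pairsB_eq_pairA (t : List String) : pairsB t = pairA t := by
  unfold pairsB
  rw [slice?_step2, slice?_step2_one]
  simp only [Option.getD_some, F_eq_ev, ← ev_false_eq_tail]
  exact zip_ev_eq_pairA t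

-- ===== VERDICT (by name: the statement is the Claim_ definition above) =====
theorem barren_points_spec : Claim_equal_barren_points := by
  intro barren_edges _ _
  unfold Spec_barren_points barren_points barren_points_alt
  simp only [PySem.List.foldl_append_singleton_eq_map, List.nil_append, pairsB_eq_pairA]
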